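-- pv_equiv track=rewrite | github.com/digitalandrew/wairz | backend/app/services/sbom_service.py | _parse_control_block
-- ===== SOURCE A (Python) =====
-- def _parse_control_block(block: str) -> dict[str, str]:
--     """Parse a Debian-style control file block into a dict."""
--     fields: dict[str, str] = {}
--     current_key = ""
--     current_val = ""
--     for line in block.splitlines():
--         if line.startswith((" ", "\t")):
--             # Continuation line
--             current_val += "\n" + line.strip()
--         elif ":" in line:
--             # Save previous field
--             if current_key:
--                 fields[current_key.lower()] = current_val
--             key, _, val = line.partition(":")
--             current_key = key.strip()
--             current_val = val.strip()
--     if current_key: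
--         fields[current_key.lower()] = current_val
--     return fields
-- ===== SOURCE B (Python) =====
-- def _parse_control_block(block: str) -> dict[str, str]:
--     """Parse a Debian-style control file block into a dict (two-pass grouping)."""
--     # Pass 1: partition lines into field groups (header line + its continuation lines).
--     groups: list[tuple[str, list[str]]] = []
--     for line in block.splitlines():
--         if line.startswith((" ", "\t")):
--             if groups:
--                 groups[-1][1].append(line)
--         elif ":" in line:
--             groups.append((line, []))
--         # any other line is discarded
--     # Pass 2: turn each group into a field; later duplicates overwrite in place.
--     fields: dict[str, str] = {}
--     for header, conts in groups:
--         key, _, val = header.partition(":")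
--         key = key.strip()
--         value = val.strip()
--         for c in conts:
--             value += "\n" + c.strip()
--         if key:
--             fields[key.lower()] = value
--     return fields
-- ===== Notes on version B (the rewrite author's own statement) =====
-- stated objective: alternative
-- what changed: Replaces A's single pass with mutable pending-field state (key/value carried across iterations, flushed on the next header and at the end) by a two-pass decomposition: first group lines into (header, continuations) groups, then fold each group independently into the dict.
import Mathlib
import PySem

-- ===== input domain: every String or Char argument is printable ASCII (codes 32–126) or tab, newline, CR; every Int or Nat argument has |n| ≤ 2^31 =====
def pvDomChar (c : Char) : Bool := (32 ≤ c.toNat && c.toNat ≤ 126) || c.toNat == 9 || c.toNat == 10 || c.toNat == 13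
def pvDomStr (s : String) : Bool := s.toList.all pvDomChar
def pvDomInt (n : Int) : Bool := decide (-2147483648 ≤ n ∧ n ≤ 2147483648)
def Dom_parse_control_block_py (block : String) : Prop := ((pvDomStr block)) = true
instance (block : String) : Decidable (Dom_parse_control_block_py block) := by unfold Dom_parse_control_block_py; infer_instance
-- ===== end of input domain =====

-- B parses in two passes (group lines into fields, then build the dict) instead of A's
-- single pass with pending key/value state; same cost, different decomposition.

-- shared primitive: Python's s.partition(":"), first and third components (exact for the 1-char separator)
def partitionColon (s : String) : String × String :=
  (String.ofList (s.toList.takeWhile (fun c => c ≠ ':')),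
   String.ofList ((s.toList.dropWhile (fun c => c ≠ ':')).drop 1))

-- shared primitive: line.startswith((" ", "\t"))
def isContLine (line : String) : Bool :=
  PySem.Str.startswith line " " || PySem.Str.startswith line "\t"

-- ===== PORT A =====
def pyStepA (st : PySem.Dict String String × String × String) (line : String) :
    PySem.Dict String String × String × String :=
  if isContLine line then
    (st.1, st.2.1, st.2.2 ++ "\n" ++ PySem.Str.strip line)
  else if PySem.Str.isIn ":" line then
    let fields' := if st.2.1 ≠ "" then st.1.insert (PySem.Str.lower st.2.1) st.2.2 else st.1
    let kv := partitionColon line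
    (fields', PySem.Str.strip kv.1, PySem.Str.strip kv.2)
  else
    st

def parse_control_block_py (block : String) : List (String × String) :=
  let st := (PySem.Str.splitlines block).foldl pyStepA (PySem.Dict.empty, "", "")
  (if st.2.1 ≠ "" then st.1.insert (PySem.Str.lower st.2.1) st.2.2 else st.1).items

-- ===== PORT B =====
-- pass 1 step: open a group on a header line, append continuations to the last group
def pyStepGroup (gs : List (String × List String)) (line : String) :
    List (String × List String) :=
  if isContLine line then
    match gs.getLast? with
    | none => gs
    | some g => gs.dropLast ++ [(g.1, g.2 ++ [line])]
  else if PySem.Str.isIn ":" line then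
    gs ++ [(line, [])]
  else
    gs

-- pass 2 step: one group becomes one field assignment
def pyAssign (fields : PySem.Dict String String) (g : String × List String) :
    PySem.Dict String String :=
  let kv := partitionColon g.1
  let key := PySem.Str.strip kv.1
  let value := g.2.foldl (fun v c => v ++ "\n" ++ PySem.Str.strip c) (PySem.Str.strip kv.2)
  if key ≠ "" then fields.insert (PySem.Str.lower key) value else fields

def parse_control_block_py_alt (block : String) : List (String × String) :=
  let groups := (PySem.Str.splitlines block).foldl pyStepGroup []
  (groups.foldl pyAssign PySem.Dict.empty).items

-- ===== PRECONDITION & SPEC =====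
def Spec_parse_control_block_py (block : String) (out : List (String × String)) : Prop := out = parse_control_block_py_alt block
instance (block : String) (out : List (String × String)) : Decidable (Spec_parse_control_block_py block out) := by unfold Spec_parse_control_block_py; infer_instance

-- ===== CLAIM (what is proved, stated in full; the proofs are below) =====
def Claim_equal_parse_control_block_py : Prop := ∀ (block : String), Dom_parse_control_block_py block → Spec_parse_control_block_py block (parse_control_block_py block)

-- ===== LEMMAS AND PROOFS =====

-- common reference recursion: A's loop written structurally (state = dict, pending key, pending value)
def specParse : List String → PySem.Dict String String → String → String → PySem.Dict String String
  | [], d, ck, cv => if ck ≠ "" then d.insert (PySem.Str.lower ck) cv else d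
  | line :: rest, d, ck, cv =>
    if isContLine line then
      specParse rest d ck (cv ++ "\n" ++ PySem.Str.strip line)
    else if PySem.Str.isIn ":" line then
      specParse rest (if ck ≠ "" then d.insert (PySem.Str.lower ck) cv else d)
        (PySem.Str.strip (partitionColon line).1) (PySem.Str.strip (partitionColon line).2)
    else
      specParse rest d ck cv

lemma foldA_eq_spec (lines : List String) (d : PySem.Dict String String) (ck cv : String) :
    (let st := lines.foldl pyStepA (d, ck, cv)
     if st.2.1 ≠ "" then st.1.insert (PySem.Str.lower st.2.1) st.2.2 else st.1)
      = specParse lines d ck cv := by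
  induction lines generalizing d ck cv with
  | nil => simp [specParse]
  | cons line rest ih =>
    simp only [List.foldl_cons, specParse]
    by_cases h1 : isContLine line = true
    · simpa [pyStepA, h1] using ih d ck (cv ++ "\n" ++ PySem.Str.strip line)
    · by_cases h2 : PySem.Chars.isIn [':'] line.toList = true
      · simpa [pyStepA, h1, h2] using
          ih (if ck ≠ "" then d.insert (PySem.Str.lower ck) cv else d)
            (PySem.Str.strip (partitionColon line).1) (PySem.Str.strip (partitionColon line).2)
      · simpa [pyStepA, h1, h2] using ih d ck cv

-- while no field is pending (ck = ""), the pending value is never observed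
lemma spec_empty_key (lines : List String) (d : PySem.Dict String String) (cv cv' : String) :
    specParse lines d "" cv = specParse lines d "" cv' := by
  induction lines generalizing d cv cv' with
  | nil => simp [specParse]
  | cons line rest ih =>
    simp only [specParse]
    split_ifs with h1 h2 h3
    · exact ih d _ _
    · exact absurd rfl h3
    · rfl
    · exact ih d cv cv'

-- grouping pass written structurally, with the currently open group as explicit state
def groupsAux : Option (String × List String) → List String → List (String × List String)
  | cur, [] => cur.toList
  | cur, line :: rest =>
    if isContLine line then
      match cur with
      | none => groupsAux none rest
      | some g => groupsAux (some (g.1, g.2 ++ [line])) rest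
    else if PySem.Str.isIn ":" line then
      cur.toList ++ groupsAux (some (line, [])) rest
    else
      groupsAux cur rest

lemma foldG_eq_aux (lines : List String) (front : List (String × List String))
    (cur : Option (String × List String)) (h : cur = none → front = []) :
    lines.foldl pyStepGroup (front ++ cur.toList) = front ++ groupsAux cur lines := by
  induction lines generalizing front cur with
  | nil => simp [groupsAux]
  | cons line rest ih =>
    by_cases h1 : isContLine line = true
    · cases cur with
      | none =>
        have hf : front = [] := h rfl
        subst hf
        simpa [pyStepGroup, groupsAux, h1] using ih [] none (fun _ => rfl)
      | some g =>
        have hstep : pyStepGroup (front ++ [g]) line = front ++ [(g.1, g.2 ++ [line])] := by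
          simp [pyStepGroup, h1]
        rw [show ((some g : Option (String × List String))).toList = [g] from rfl,
          List.foldl_cons, hstep,
          show groupsAux (some g) (line :: rest) = groupsAux (some (g.1, g.2 ++ [line])) rest
            from by simp [groupsAux, h1]]
        simpa using ih front (some (g.1, g.2 ++ [line])) (by simp)
    · by_cases h2 : PySem.Chars.isIn [':'] line.toList = true
      · have hstep : pyStepGroup (front ++ cur.toList) line
            = (front ++ cur.toList) ++ [(line, [])] := by
          simp [pyStepGroup, h1, h2]
        rw [List.foldl_cons, hstep,
          show groupsAux cur (line :: rest) = cur.toList ++ groupsAux (some (line, [])) rest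
            from by simp [groupsAux, h1, h2]]
        have := ih (front ++ cur.toList) (some (line, [])) (by simp)
        simpa [List.append_assoc] using this
      · simpa [pyStepGroup, groupsAux, h1, h2] using ih front cur h

-- A's pending key/value reconstructed from the currently open group
def ckOf : Option (String × List String) → String
  | none => ""
  | some g => PySem.Str.strip (partitionColon g.1).1

def cvOf : Option (String × List String) → String
  | none => ""
  | some g => g.2.foldl (fun v c => v ++ "\n" ++ PySem.Str.strip c) (PySem.Str.strip (partitionColon g.1).2)

lemma proc_aux_eq_spec (lines : List String) (d : PySem.Dict String String)
    (cur : Option (String × List String)) :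
    (groupsAux cur lines).foldl pyAssign d = specParse lines d (ckOf cur) (cvOf cur) := by
  induction lines generalizing d cur with
  | nil =>
    cases cur with
    | none => simp [groupsAux, specParse, ckOf]
    | some g => simp [groupsAux, specParse, ckOf, cvOf, pyAssign]
  | cons line rest ih =>
    by_cases h1 : isContLine line = true
    · cases cur with
      | none =>
        rw [show groupsAux none (line :: rest) = groupsAux none rest from by simp [groupsAux, h1],
          ih d none]
        simp only [specParse]
        rw [if_pos h1]
        exact spec_empty_key rest d "" _
      | some g =>
        rw [show groupsAux (some g) (line :: rest) = groupsAux (some (g.1, g.2 ++ [line])) rest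
            from by simp [groupsAux, h1],
          ih d (some (g.1, g.2 ++ [line]))]
        simp only [specParse]
        rw [if_pos h1]
        have hcv : cvOf (some (g.1, g.2 ++ [line]))
            = cvOf (some g) ++ "\n" ++ PySem.Str.strip line := by
          simp [cvOf]
        rw [hcv]
        rfl
    · by_cases h2 : PySem.Chars.isIn [':'] line.toList = true
      · have hflush : (cur.toList).foldl pyAssign d
            = (if ckOf cur ≠ "" then d.insert (PySem.Str.lower (ckOf cur)) (cvOf cur) else d) := by
          cases cur with
          | none => simp [ckOf]
          | some g => simp [pyAssign, ckOf, cvOf]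
        rw [show groupsAux cur (line :: rest) = cur.toList ++ groupsAux (some (line, [])) rest
            from by simp [groupsAux, h1, h2],
          show specParse (line :: rest) d (ckOf cur) (cvOf cur)
              = specParse rest (if ckOf cur ≠ "" then d.insert (PySem.Str.lower (ckOf cur)) (cvOf cur) else d)
                  (PySem.Str.strip (partitionColon line).1) (PySem.Str.strip (partitionColon line).2)
            from by simp [specParse, h1, h2],
          List.foldl_append, hflush]
        exact ih _ (some (line, []))
      · rw [show groupsAux cur (line :: rest) = groupsAux cur rest from by simp [groupsAux, h1, h2],
          show specParse (line :: rest) d (ckOf cur) (cvOf cur) = specParse rest d (ckOf cur) (cvOf cur)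
            from by simp [specParse, h1, h2]]
        exact ih d cur

-- ===== VERDICT (by name: the statement is the Claim_ definition above) =====
theorem parse_control_block_py_spec : Claim_equal_parse_control_block_py := by
  intro block _
  unfold Spec_parse_control_block_py parse_control_block_py parse_control_block_py_alt
  have hA := foldA_eq_spec (PySem.Str.splitlines block) PySem.Dict.empty "" ""
  have hG := foldG_eq_aux (PySem.Str.splitlines block) [] none (fun _ => rfl)
  have hB := proc_aux_eq_spec (PySem.Str.splitlines block) PySem.Dict.empty none
  simp only [List.nil_append, Option.toList] at hG
  simp only [hA, hG, hB, ckOf, cvOf]
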